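-- pv_equiv track=rewrite | github.com/HibernalGlow/ArtistPreview | src/samea/__main__.py | find_balanced_brackets
-- ===== SOURCE A (Python) =====
-- from typing import List, Set, Dict, Tuple
--
-- def find_balanced_brackets(text: str) -> List[Tuple[int, int, str]]:
--     """
--     找到所有配对的方括号及其内容
--     返回: [(start_pos, end_pos, content), ...]
--     """
--     brackets = []
--     stack = []
--     i = 0
--
--     while i < len(text):
--         if text[i] == '[':
--             stack.append(i)
--         elif text[i] == ']' and stack:
--             start = stack.pop()
--             content = text[start+1:i]
--             # 只保留内容不为空且不包含嵌套方括号的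
--             if content and '[' not in content and ']' not in content:
--                 brackets.append((start, i, content))
--         i += 1
--
--     return brackets
-- ===== SOURCE B (Python) =====
-- def find_balanced_brackets(text):
--     # Two staged passes: collect every bracket character with its position,
--     # then emit each consecutive pair ('[', ']') whose gap is non-empty.
--     brk = [(i, ch) for i, ch in enumerate(text) if ch in '[]']
--     return [(p, q, text[p + 1:q])
--             for (p, cp), (q, cq) in zip(brk, brk[1:])
--             if cp == '[' and cq == ']' and q > p + 1]
-- ===== Notes on version B (the rewrite author's own statement) =====
-- stated objective: alternative
-- what changed: B replaces A's stack-driven scan, which re-slices and re-scans the enclosed substring at every closing bracket, by two staged passes: first collect every bracket character with its position, then emit each consecutive bracket pair that is an opening bracket followed by a closing one with a non-empty gap.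
import Mathlib
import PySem

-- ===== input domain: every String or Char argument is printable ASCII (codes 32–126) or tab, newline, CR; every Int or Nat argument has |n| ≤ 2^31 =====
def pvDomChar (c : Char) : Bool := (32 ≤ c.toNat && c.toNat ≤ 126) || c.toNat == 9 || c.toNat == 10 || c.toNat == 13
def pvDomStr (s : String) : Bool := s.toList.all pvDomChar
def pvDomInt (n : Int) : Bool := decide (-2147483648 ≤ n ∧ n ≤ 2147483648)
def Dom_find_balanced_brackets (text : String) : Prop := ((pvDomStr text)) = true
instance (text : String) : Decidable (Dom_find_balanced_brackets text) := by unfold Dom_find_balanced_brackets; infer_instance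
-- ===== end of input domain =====

-- B replaces A's stack-driven scan (which re-slices the enclosed substring at every
-- closing bracket) by two staged passes: collect all bracket characters with positions,
-- then emit each consecutive opening/closing pair with a non-empty gap (objective: alternative).

-- ===== PORT A =====
-- the body of A's while loop (i runs over all character positions; state = (brackets, stack))
def pvStepA (text : String) (st : List (Int × Int × String) × List Int) (ic : Int × Char) :
    List (Int × Int × String) × List Int :=
  if ic.2 = '[' then (st.1, ic.1 :: st.2)
  else if ic.2 = ']' then
    match st.2 with
    | [] => st                                -- "and stack" fails: nothing happens
    | start :: rest =>                        -- start = stack.pop()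
      let content := PySem.Str.slice text (some (start + 1)) (some ic.1)
      if content ≠ "" ∧ PySem.Str.isIn "[" content = false ∧ PySem.Str.isIn "]" content = false
      then (st.1 ++ [(start, ic.1, content)], rest)
      else (st.1, rest)
  else st

def find_balanced_brackets (text : String) : List (Int × Int × String) :=
  ((PySem.List.enumerate text.toList 0).foldl (pvStepA text) ([], [])).1

-- ===== PORT B =====
-- first pass: brk = [(i, ch) for i, ch in enumerate(text) if ch in '[]']
def pvBrk (text : String) : List (Int × Char) :=
  (PySem.List.enumerate text.toList 0).filter (fun ic => ic.2 == '[' || ic.2 == ']')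

-- the conditional body of B's pair comprehension
def pvEmit (text : String) (pq : (Int × Char) × (Int × Char)) : Option (Int × Int × String) :=
  if pq.1.2 = '[' ∧ pq.2.2 = ']' ∧ pq.1.1 + 1 < pq.2.1
  then some (pq.1.1, pq.2.1, PySem.Str.slice text (some (pq.1.1 + 1)) (some pq.2.1))
  else none

-- second pass: zip(brk, brk[1:]) filtered and mapped by the comprehension body
def find_balanced_brackets_alt (text : String) : List (Int × Int × String) :=
  ((pvBrk text).zip (pvBrk text).tail).filterMap (pvEmit text)

-- ===== PRECONDITION & SPEC =====
def Spec_find_balanced_brackets (text : String) (out : List (Int × Int × String)) : Prop := out = find_balanced_brackets_alt text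
instance (text : String) (out : List (Int × Int × String)) : Decidable (Spec_find_balanced_brackets text out) := by unfold Spec_find_balanced_brackets; infer_instance

-- ===== CLAIM (what is proved, stated in full; the proofs are below) =====
def Claim_equal_find_balanced_brackets : Prop := ∀ (text : String), Dom_find_balanced_brackets text → Spec_find_balanced_brackets text (find_balanced_brackets text)

-- ===== LEMMAS AND PROOFS =====

-- Proof-internal middle form: a single pass remembering only the index of the most
-- recent bracket character when it was '[' (else -1).  A's fold is first proved equal
-- to this fold (pv_main), which is then proved equal to B's staged computation (pv_b).
def pvStepL (text : String) (st : List (Int × Int × String) × Int) (ic : Int × Char) :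
    List (Int × Int × String) × Int :=
  if ic.2 = '[' then (st.1, ic.1)
  else if ic.2 = ']' then
    ((if 0 ≤ st.2 ∧ st.2 + 1 < ic.1
      then st.1 ++ [(st.2, ic.1, PySem.Str.slice text (some (st.2 + 1)) (some ic.1))]
      else st.1), -1)
  else st

-- Invariant tying A's stack to the middle form's last_open after the prefix `pre`:
-- every stack entry is an index below |pre|; if last ≥ 0 it is the top of the stack
-- and no bracket character occurs after it in pre; otherwise every stack entry has some
-- bracket character strictly after it in pre.
def pvInv (pre : List Char) (stack : List Int) (last : Int) : Prop :=
  (∀ p ∈ stack, ∃ k : Nat, p = (k : Int) ∧ k < pre.length) ∧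
  (if 0 ≤ last then
     ∃ k : Nat, last = (k : Int) ∧ k < pre.length ∧ stack.head? = some (k : Int) ∧
       '[' ∉ pre.drop (k + 1) ∧ ']' ∉ pre.drop (k + 1)
   else
     ∀ p ∈ stack, ∃ k : Nat, p = (k : Int) ∧ k < pre.length ∧
       ('[' ∈ pre.drop (k + 1) ∨ ']' ∈ pre.drop (k + 1)))

lemma pv_content_eq (pre rest : List Char) (k : Nat) (hk : k < pre.length) :
    PySem.List.slice (pre ++ rest) (some ((k : Int) + 1)) (some (pre.length : Int)) =
      pre.drop (k + 1) := by
  have h1 : ((k : Int) + 1) = ((k + 1 : Nat) : Int) := by push_cast; ring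
  rw [h1, PySem.List.slice_natCast]
  rw [List.drop_append_of_le_length (by omega)]
  rw [List.take_append_of_le_length (by simp)]
  simp

lemma pv_singleton_infix {c : Char} {l : List Char} : [c] <:+: l ↔ c ∈ l := by
  constructor
  · rintro ⟨s, t, h⟩; subst h; simp
  · intro h
    obtain ⟨s, t, h⟩ := List.append_of_mem h
    exact ⟨s, t, by simp [h]⟩

lemma pv_str_ne_empty_iff (s : String) : s ≠ "" ↔ s.toList ≠ [] :=
  not_congr String.toList_eq_nil_iff.symm

lemma pv_isIn_single_false_iff {sub s : String} {c : Char} (hsub : sub.toList = [c]) :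
    PySem.Str.isIn sub s = false ↔ c ∉ s.toList := by
  rw [PySem.Str.isIn_eq, PySem.Chars.isIn_eq_false_iff, hsub, pv_singleton_infix]

lemma pv_main (text : String) :
    ∀ (rest pre : List Char) (acc : List (Int × Int × String)) (stack : List Int) (last : Int),
      text.toList = pre ++ rest → pvInv pre stack last →
      ((PySem.List.enumerate rest (pre.length : Int)).foldl (pvStepA text) (acc, stack)).1 =
        ((PySem.List.enumerate rest (pre.length : Int)).foldl (pvStepL text) (acc, last)).1 := by
  intro rest
  induction rest with
  | nil => intro pre acc stack last _ _; simp [PySem.List.enumerate]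
  | cons c rest ih =>
    intro pre acc stack last htext hinv
    obtain ⟨hstk, hlast⟩ := hinv
    rw [PySem.List.enumerate_cons, List.foldl_cons, List.foldl_cons]
    have hlen1 : ((pre.length : Int) + 1) = (((pre ++ [c]).length : Nat) : Int) := by
      simp
    have htext' : text.toList = (pre ++ [c]) ++ rest := by simpa using htext
    have hcontent : ∀ k : Nat, k < pre.length →
        (PySem.Str.slice text (some ((k : Int) + 1)) (some (pre.length : Int))).toList =
          pre.drop (k + 1) := by
      intro k hk
      have h := pv_content_eq pre (c :: rest) k hk
      simp only [PySem.Str.toList_slice, PySem.Chars.slice_eq_listSlice]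
      rw [htext]; exact h
    by_cases hc : c = '['
    · -- both record position pre.length
      have hA : pvStepA text (acc, stack) ((pre.length : Int), c) = (acc, (pre.length : Int) :: stack) := by
        simp [pvStepA, hc]
      have hB : pvStepL text (acc, last) ((pre.length : Int), c) = (acc, (pre.length : Int)) := by
        simp [pvStepL, hc]
      rw [hA, hB, hlen1]
      apply ih (pre ++ [c]) acc _ _ htext'
      constructor
      · intro p hp
        rcases List.mem_cons.mp hp with hp | hp
        · exact ⟨pre.length, hp, by simp⟩
        · obtain ⟨k, hk1, hk2⟩ := hstk p hp
          exact ⟨k, hk1, by simp; omega⟩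
      · rw [if_pos (Int.natCast_nonneg pre.length)]
        refine ⟨pre.length, rfl, by simp, by simp, ?_, ?_⟩ <;>
          simp
    · by_cases hc2 : c = ']'
      · -- closing bracket
        cases stack with
        | nil =>
          have hlastneg : ¬ 0 ≤ last := by
            intro h
            rw [if_pos h] at hlast
            obtain ⟨k, _, _, hhead, _⟩ := hlast
            simp at hhead
          have hA : pvStepA text (acc, ([] : List Int)) ((pre.length : Int), c) = (acc, []) := by
            simp [pvStepA, hc2]
          have hB : pvStepL text (acc, last) ((pre.length : Int), c) = (acc, -1) := by
            simp [pvStepL, hc2, hlastneg]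
          rw [hA, hB, hlen1]
          apply ih (pre ++ [c]) acc _ _ htext'
          refine ⟨by simp, ?_⟩
          rw [if_neg (by norm_num)]
          simp
        | cons p rest' =>
          obtain ⟨k, hpk, hklt⟩ := hstk p (List.mem_cons_self ..)
          subst hpk
          have hct := hcontent k hklt
          have hlastk : 0 ≤ last → last = (k : Int) ∧ '[' ∉ pre.drop (k + 1) ∧ ']' ∉ pre.drop (k + 1) := by
            intro hl
            rw [if_pos hl] at hlast
            obtain ⟨k', h1, _, hhead, h4, h5⟩ := hlast
            have hkk : k' = k := by
              simp only [List.head?_cons, Option.some.injEq] at hhead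
              exact_mod_cast hhead.symm
            subst hkk
            exact ⟨h1, h4, h5⟩
          have hlastneg : ¬ 0 ≤ last → '[' ∈ pre.drop (k + 1) ∨ ']' ∈ pre.drop (k + 1) := by
            intro hl
            rw [if_neg hl] at hlast
            obtain ⟨k2, h1, _, h3⟩ := hlast ((k : Int)) (List.mem_cons_self ..)
            have hkk : k2 = k := by exact_mod_cast h1.symm
            subst hkk
            exact h3
          -- A's emission test ↔ the middle form's emission test, under the invariant
          have hcond :
              (PySem.Str.slice text (some ((k : Int) + 1)) (some (pre.length : Int)) ≠ "" ∧
               PySem.Str.isIn "[" (PySem.Str.slice text (some ((k : Int) + 1)) (some (pre.length : Int))) = false ∧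
               PySem.Str.isIn "]" (PySem.Str.slice text (some ((k : Int) + 1)) (some (pre.length : Int))) = false)
              ↔ (0 ≤ last ∧ last + 1 < (pre.length : Int)) := by
            constructor
            · rintro ⟨hne, hL, hR⟩
              have hLm := (pv_isIn_single_false_iff (c := '[') (by decide)).mp hL
              have hRm := (pv_isIn_single_false_iff (c := ']') (by decide)).mp hR
              rw [hct] at hLm hRm
              have hne' : pre.drop (k + 1) ≠ [] := by
                have h := (pv_str_ne_empty_iff _).mp hne
                rwa [hct] at h
              have hlt : k + 1 < pre.length := by
                rcases Nat.lt_or_ge (k + 1) pre.length with h | h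
                · exact h
                · exact absurd (List.drop_eq_nil_iff.mpr h) hne'
              have hl : 0 ≤ last := by
                by_contra hneg
                rcases hlastneg hneg with h | h
                · exact hLm h
                · exact hRm h
              obtain ⟨hlk, _, _⟩ := hlastk hl
              refine ⟨hl, ?_⟩
              rw [hlk]
              exact_mod_cast hlt
            · rintro ⟨hl, hlt⟩
              obtain ⟨hlk, hnoL, hnoR⟩ := hlastk hl
              have hlt' : k + 1 < pre.length := by
                rw [hlk] at hlt
                exact_mod_cast hlt
              refine ⟨?_, ?_, ?_⟩
              · rw [pv_str_ne_empty_iff, hct]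
                intro h
                have := List.drop_eq_nil_iff.mp h
                omega
              · rw [pv_isIn_single_false_iff (c := '[') (by decide), hct]
                exact hnoL
              · rw [pv_isIn_single_false_iff (c := ']') (by decide), hct]
                exact hnoR
          -- both sides compute the same accumulator and the matching next states
          by_cases hemit : 0 ≤ last ∧ last + 1 < (pre.length : Int)
          · obtain ⟨hlk, _, _⟩ := hlastk hemit.1
            have hA : pvStepA text (acc, (k : Int) :: rest') ((pre.length : Int), c) =
                (acc ++ [((k : Int), (pre.length : Int),
                  PySem.Str.slice text (some ((k : Int) + 1)) (some (pre.length : Int)))], rest') := by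
              simp only [pvStepA, hc2, reduceIte]
              rw [if_pos (hcond.mpr hemit)]
              simp
            have hB : pvStepL text (acc, last) ((pre.length : Int), c) =
                (acc ++ [((k : Int), (pre.length : Int),
                  PySem.Str.slice text (some ((k : Int) + 1)) (some (pre.length : Int)))], -1) := by
              simp only [pvStepL, hc2, reduceIte]
              rw [if_pos hemit, hlk]
              simp
            rw [hA, hB, hlen1]
            apply ih (pre ++ [c]) _ _ _ htext'
            refine ⟨?_, ?_⟩
            · intro p hp
              obtain ⟨k2, h1, h2⟩ := hstk p (List.mem_cons_of_mem _ hp)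
              exact ⟨k2, h1, by simp; omega⟩
            · rw [if_neg (by norm_num)]
              intro p hp
              obtain ⟨k2, h1, h2⟩ := hstk p (List.mem_cons_of_mem _ hp)
              refine ⟨k2, h1, by simp; omega, Or.inr ?_⟩
              rw [List.drop_append_of_le_length (by omega)]
              simp [hc2]
          · have hA : pvStepA text (acc, (k : Int) :: rest') ((pre.length : Int), c) = (acc, rest') := by
              simp only [pvStepA, hc2, reduceIte]
              rw [if_neg (fun h => hemit (hcond.mp h))]
              simp
            have hB : pvStepL text (acc, last) ((pre.length : Int), c) = (acc, -1) := by
              simp only [pvStepL, hc2, reduceIte]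
              rw [if_neg hemit]
              simp
            rw [hA, hB, hlen1]
            apply ih (pre ++ [c]) _ _ _ htext'
            refine ⟨?_, ?_⟩
            · intro p hp
              obtain ⟨k2, h1, h2⟩ := hstk p (List.mem_cons_of_mem _ hp)
              exact ⟨k2, h1, by simp; omega⟩
            · rw [if_neg (by norm_num)]
              intro p hp
              obtain ⟨k2, h1, h2⟩ := hstk p (List.mem_cons_of_mem _ hp)
              refine ⟨k2, h1, by simp; omega, Or.inr ?_⟩
              rw [List.drop_append_of_le_length (by omega)]
              simp [hc2]
      · -- ordinary character: both states unchanged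
        have hA : pvStepA text (acc, stack) ((pre.length : Int), c) = (acc, stack) := by
          simp [pvStepA, hc, hc2]
        have hB : pvStepL text (acc, last) ((pre.length : Int), c) = (acc, last) := by
          simp [pvStepL, hc, hc2]
        rw [hA, hB, hlen1]
        apply ih (pre ++ [c]) acc _ _ htext'
        constructor
        · intro p hp
          obtain ⟨k, hk1, hk2⟩ := hstk p hp
          exact ⟨k, hk1, by simp; omega⟩
        · by_cases hl : 0 ≤ last
          · rw [if_pos hl] at hlast ⊢
            obtain ⟨k, h1, h2, h3, h4, h5⟩ := hlast
            refine ⟨k, h1, by simp; omega, h3, ?_, ?_⟩ <;>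
              rw [List.drop_append_of_le_length (by omega)] <;>
              simp only [List.mem_append, List.mem_singleton]
            · rintro (h | h)
              · exact h4 h
              · exact hc h.symm
            · rintro (h | h)
              · exact h5 h
              · exact hc2 h.symm
          · rw [if_neg hl] at hlast ⊢
            intro p hp
            obtain ⟨k, h1, h2, h3⟩ := hlast p hp
            refine ⟨k, h1, by simp; omega, ?_⟩
            rw [List.drop_append_of_le_length (by omega)]
            rcases h3 with h | h
            · exact Or.inl (List.mem_append_left _ h)
            · exact Or.inr (List.mem_append_left _ h)

-- B's second pass as a function of an arbitrary bracket list
def pvG (text : String) (l : List (Int × Char)) : List (Int × Int × String) :=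
  (l.zip l.tail).filterMap (pvEmit text)

-- the pending state of the middle form, as a (≤ 1)-element bracket list
def pvPend (last : Int) : List (Int × Char) :=
  if 0 ≤ last then [(last, '[')] else []

lemma pvG_cons_cons (text : String) (x y : Int × Char) (l : List (Int × Char)) :
    pvG text (x :: y :: l) = (pvEmit text (x, y)).toList ++ pvG text (y :: l) := by
  cases h : pvEmit text (x, y) <;> simp [pvG, h]

lemma pvG_close (text : String) (q : Int) (l : List (Int × Char)) :
    pvG text ((q, ']') :: l) = pvG text l := by
  cases l with
  | nil => rfl
  | cons y l' =>
    rw [pvG_cons_cons]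
    have h : pvEmit text ((q, ']'), y) = none := by
      simp [pvEmit]
    simp [h]

lemma pv_b (text : String) :
    ∀ (cs : List Char) (i : Int) (acc : List (Int × Int × String)) (last : Int), 0 ≤ i →
      ((PySem.List.enumerate cs i).foldl (pvStepL text) (acc, last)).1 =
        acc ++ pvG text (pvPend last ++
          (PySem.List.enumerate cs i).filter (fun ic => ic.2 == '[' || ic.2 == ']')) := by
  intro cs
  induction cs with
  | nil =>
    intro i acc last _
    unfold pvPend
    split_ifs <;> simp [PySem.List.enumerate, pvG]
  | cons c cs ih =>
    intro i acc last hi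
    rw [PySem.List.enumerate_cons, List.foldl_cons]
    by_cases hc : c = '['
    · subst hc
      have hfc : ((i, '[') :: PySem.List.enumerate cs (i + 1)).filter
            (fun ic => ic.2 == '[' || ic.2 == ']') =
          (i, '[') :: (PySem.List.enumerate cs (i + 1)).filter
            (fun ic => ic.2 == '[' || ic.2 == ']') := by
        simp
      rw [hfc, show pvStepL text (acc, last) (i, '[') = (acc, i) from by simp [pvStepL],
          ih (i + 1) acc i (by omega)]
      congr 1
      rw [show pvPend i = [(i, '[')] from by simp [pvPend, hi]]
      by_cases hl : 0 ≤ last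
      · rw [show pvPend last = [(last, '[')] from by simp [pvPend, hl]]
        simp only [List.cons_append, List.nil_append]
        have hG : pvG text ((last, '[') :: (i, '[') ::
              (PySem.List.enumerate cs (i + 1)).filter (fun ic => ic.2 == '[' || ic.2 == ']')) =
            pvG text ((i, '[') ::
              (PySem.List.enumerate cs (i + 1)).filter (fun ic => ic.2 == '[' || ic.2 == ']')) := by
          rw [pvG_cons_cons,
              show pvEmit text ((last, '['), (i, '[')) = none from by simp [pvEmit]]
          simp
        rw [hG]
      · rw [show pvPend last = [] from by simp [pvPend, hl]]
        simp
    · by_cases hc2 : c = ']'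
      · subst hc2
        have hfc : ((i, ']') :: PySem.List.enumerate cs (i + 1)).filter
              (fun ic => ic.2 == '[' || ic.2 == ']') =
            (i, ']') :: (PySem.List.enumerate cs (i + 1)).filter
              (fun ic => ic.2 == '[' || ic.2 == ']') := by
          simp
        rw [hfc,
            show pvStepL text (acc, last) (i, ']') =
              ((if 0 ≤ last ∧ last + 1 < i
                then acc ++ [(last, i, PySem.Str.slice text (some (last + 1)) (some i))]
                else acc), -1) from by simp [pvStepL],
            ih (i + 1) _ (-1) (by omega),
            show pvPend (-1) = ([] : List (Int × Char)) from by simp [pvPend],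
            List.nil_append]
        by_cases hl : 0 ≤ last
        · rw [show pvPend last = [(last, '[')] from by simp [pvPend, hl]]
          simp only [List.cons_append, List.nil_append]
          have hG : pvG text ((last, '[') :: (i, ']') ::
                (PySem.List.enumerate cs (i + 1)).filter (fun ic => ic.2 == '[' || ic.2 == ']')) =
              (pvEmit text ((last, '['), (i, ']'))).toList ++
                pvG text ((PySem.List.enumerate cs (i + 1)).filter
                  (fun ic => ic.2 == '[' || ic.2 == ']')) := by
            rw [pvG_cons_cons, pvG_close]
          rw [hG]
          by_cases hlt : last + 1 < i
          · rw [if_pos ⟨hl, hlt⟩,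
                show pvEmit text ((last, '['), (i, ']')) =
                  some (last, i, PySem.Str.slice text (some (last + 1)) (some i)) from by
                  simp [pvEmit, hlt]]
            simp
          · rw [if_neg (fun h => hlt h.2),
                show pvEmit text ((last, '['), (i, ']')) = none from by simp [pvEmit, hlt]]
            simp
        · rw [if_neg (fun h => hl h.1),
              show pvPend last = [] from by simp [pvPend, hl],
              List.nil_append, pvG_close]
      · have hfc : ((i, c) :: PySem.List.enumerate cs (i + 1)).filter
              (fun ic => ic.2 == '[' || ic.2 == ']') =
            (PySem.List.enumerate cs (i + 1)).filter (fun ic => ic.2 == '[' || ic.2 == ']') := by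
          simp [hc, hc2]
        rw [hfc, show pvStepL text (acc, last) (i, c) = (acc, last) from by
              simp [pvStepL, hc, hc2],
            ih (i + 1) acc last (by omega)]

-- ===== VERDICT (by name: the statement is the Claim_ definition above) =====
theorem find_balanced_brackets_spec : Claim_equal_find_balanced_brackets := by
  intro text _
  unfold Spec_find_balanced_brackets find_balanced_brackets
  have h1 := pv_main text text.toList [] [] [] (-1) (by simp)
    ⟨by simp, by rw [if_neg (by norm_num)]; simp⟩
  have h2 := pv_b text text.toList 0 [] (-1) (by omega)
  have hpend : pvPend (-1) = [] := by simp [pvPend]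
  rw [hpend, List.nil_append, List.nil_append] at h2
  simpa [find_balanced_brackets_alt, pvBrk, pvG] using h1.trans h2
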